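-- pv_equiv track=rewrite | github.com/Zanzibarra/solutions_small_problems | woods.py | brutforce
-- ===== SOURCE A (Python) =====
-- def brutforce(x: tuple = ()) -> list:
--     result = []
--     if len(x) == 7:
--         oak = x[0] * 100 + x[1] * 10 + x[2]
--         grove = x[3] * 1000 + x[4] * 100 + x[5] * 10 + x[6]
--         if grove % oak == 0:
--             return [(oak, grove // oak, grove)]
--         else:
--             return []
--     for xi in range(0, 9):
--         if not (xi in x):
--         # if not (xi in x) and ((xi != 0) or ((len(x) != 0) and (len(x) != 3))):
--             result.extend(brutforce(tuple(list(x)+[xi])))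
--     return result
-- ===== SOURCE B (Python) =====
-- def brutforce(x: tuple = ()) -> list:
--     if len(x) > 7:
--         return []
--     level = [list(x)]
--     for _ in range(7 - len(x)):
--         level = [p + [d] for p in level for d in range(9) if d not in p]
--     result = []
--     for t in level:
--         oak = t[0] * 100 + t[1] * 10 + t[2]
--         grove = t[3] * 1000 + t[4] * 100 + t[5] * 10 + t[6]
--         q, r = divmod(grove, oak)
--         if r == 0:
--             result.append((oak, q, grove))
--     return result
-- ===== Notes on version B (the rewrite author's own statement) =====
-- stated objective: alternative
-- what changed: A's recursive depth-first backtracking is replaced by an iterative breadth-first level expansion: the list of partial digit prefixes is widened one position per pass with a comprehension, then a single non-recursive pass evaluates the completed 7-tuples; inputs already longer than 7 return [] at once instead of A's full futile recursion over the remaining digits.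
import Mathlib
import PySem

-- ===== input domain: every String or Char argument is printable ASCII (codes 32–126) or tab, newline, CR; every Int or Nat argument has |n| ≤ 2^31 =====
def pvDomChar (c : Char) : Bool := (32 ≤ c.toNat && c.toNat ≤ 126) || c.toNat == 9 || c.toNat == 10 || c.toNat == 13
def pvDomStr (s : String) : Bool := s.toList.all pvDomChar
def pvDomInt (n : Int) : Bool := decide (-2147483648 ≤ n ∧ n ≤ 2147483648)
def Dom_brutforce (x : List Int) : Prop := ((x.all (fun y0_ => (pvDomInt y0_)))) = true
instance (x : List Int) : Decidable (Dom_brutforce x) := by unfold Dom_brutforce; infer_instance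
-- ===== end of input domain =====

-- B replaces A's recursive depth-first backtracking by an iterative level-by-level
-- expansion of partial digit lists followed by one evaluation pass (objective: alternative).

-- ===== PORT A =====
-- number of digits 0..8 not yet occurring in x (termination measure of A's recursion)
def brutAvail (x : List Int) : Nat := ((Finset.range 9).filter (fun d : Nat => ((d : Int) ∉ x))).card

theorem brutAvail_append_lt (x : List Int) (d : Int) (h0 : 0 ≤ d) (h9 : d < 9) (hx : d ∉ x) :
    brutAvail (x ++ [d]) < brutAvail x := by
  apply Finset.card_lt_card
  constructor
  · intro e he
    simp only [Finset.mem_filter, Finset.mem_range, List.mem_append, List.mem_singleton] at he ⊢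
    exact ⟨he.1, fun h => he.2 (Or.inl h)⟩
  · intro hsub
    have hd : d.toNat ∈ (Finset.range 9).filter (fun e : Nat => ((e : Int) ∉ x ++ [d])) := by
      apply hsub
      simp only [Finset.mem_filter, Finset.mem_range]
      refine ⟨by omega, ?_⟩
      rw [Int.toNat_of_nonneg h0]
      exact hx
    simp only [Finset.mem_filter, List.mem_append, List.mem_singleton] at hd
    exact hd.2 (Or.inr (Int.toNat_of_nonneg h0))

def brutforce (x : List Int) : List (List Int) :=
  if x.length = 7 then
    let oak := PySem.List.pyGetD x 0 0 * 100 + PySem.List.pyGetD x 1 0 * 10 + PySem.List.pyGetD x 2 0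
    let grove := PySem.List.pyGetD x 3 0 * 1000 + PySem.List.pyGetD x 4 0 * 100 +
                 PySem.List.pyGetD x 5 0 * 10 + PySem.List.pyGetD x 6 0
    if PySem.Int.mod grove oak = 0 then [[oak, PySem.Int.floordiv grove oak, grove]] else []
  else
    (PySem.List.pyRange 0 9 1).attach.flatMap (fun d =>
      if d.1 ∈ x then [] else brutforce (x ++ [d.1]))
termination_by brutAvail x
decreasing_by
  have hd := (PySem.List.mem_pyRange_one).1 d.2
  exact brutAvail_append_lt x d.1 hd.1 hd.2 (by assumption)

-- ===== PORT B =====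
def brutEval (t : List Int) : List (List Int) :=
  let oak := PySem.List.pyGetD t 0 0 * 100 + PySem.List.pyGetD t 1 0 * 10 + PySem.List.pyGetD t 2 0
  let grove := PySem.List.pyGetD t 3 0 * 1000 + PySem.List.pyGetD t 4 0 * 100 +
               PySem.List.pyGetD t 5 0 * 10 + PySem.List.pyGetD t 6 0
  let q := PySem.Int.floordiv grove oak
  let r := PySem.Int.mod grove oak
  if r = 0 then [[oak, q, grove]] else []

def brutStep (level : List (List Int)) : List (List Int) :=
  level.flatMap (fun p => (PySem.List.pyRange 0 9 1).flatMap (fun d => if d ∈ p then [] else [p ++ [d]]))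

def brutforce_alt (x : List Int) : List (List Int) :=
  if 7 < x.length then []
  else ((List.range (7 - x.length)).foldl (fun lv _ => brutStep lv) [x]).flatMap brutEval

-- ===== PRECONDITION & SPEC =====
-- Pre_ excludes exactly the inputs on which Python A raises ZeroDivisionError
-- (a reachable completed 7-tuple whose first three entries make oak = 0); B raises there too.
def Pre_brutforce (x : List Int) : Prop :=
  if 3 ≤ x.length ∧ x.length ≤ 7 then
    PySem.List.pyGetD x 0 0 * 100 + PySem.List.pyGetD x 1 0 * 10 + PySem.List.pyGetD x 2 0 ≠ 0
  else if x.length = 2 then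
    ∀ d ∈ Finset.range 9,
      (d : Int) ∈ x ∨ PySem.List.pyGetD x 0 0 * 100 + PySem.List.pyGetD x 1 0 * 10 + (d : Int) ≠ 0
  else True
instance (x : List Int) : Decidable (Pre_brutforce x) := by unfold Pre_brutforce; infer_instance

def pvWitness_brutforce : List Int := []

def Spec_brutforce (x : List Int) (out : List (List Int)) : Prop := out = brutforce_alt x
instance (x : List Int) (out : List (List Int)) : Decidable (Spec_brutforce x out) := by unfold Spec_brutforce; infer_instance

-- ===== CLAIM (what is proved, stated in full; the proofs are below) =====
def Claim_equal_brutforce : Prop := ∀ (x : List Int), Dom_brutforce x → Pre_brutforce x → Spec_brutforce x (brutforce x)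

-- ===== LEMMAS AND PROOFS =====
theorem brutforce_eq (x : List Int) : brutforce x =
    if x.length = 7 then
      (let oak := PySem.List.pyGetD x 0 0 * 100 + PySem.List.pyGetD x 1 0 * 10 + PySem.List.pyGetD x 2 0
       let grove := PySem.List.pyGetD x 3 0 * 1000 + PySem.List.pyGetD x 4 0 * 100 +
                    PySem.List.pyGetD x 5 0 * 10 + PySem.List.pyGetD x 6 0
       if PySem.Int.mod grove oak = 0 then [[oak, PySem.Int.floordiv grove oak, grove]] else [])
    else
      (PySem.List.pyRange 0 9 1).flatMap (fun d => if d ∈ x then [] else brutforce (x ++ [d])) := by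
  rw [brutforce]
  split
  · rfl
  · simp only [List.flatMap_subtype, List.unattach_attach]

theorem iterate_flatMap (k : Nat) (L : List (List Int)) :
    brutStep^[k] L = L.flatMap (fun p => brutStep^[k] [p]) := by
  induction k generalizing L with
  | zero => simp
  | succ k ih =>
    have h1 : brutStep L = L.flatMap (fun p => brutStep [p]) := by
      simp [brutStep]
    simp only [Function.iterate_succ_apply]
    rw [ih (brutStep L), h1, List.flatMap_assoc]
    congr 1
    funext p
    rw [← ih]

theorem iterate_flatMap' {α : Type} (k : Nat) (L : List α) (f : α → List (List Int)) :
    brutStep^[k] (L.flatMap f) = L.flatMap (fun p => brutStep^[k] (f p)) := by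
  rw [iterate_flatMap, List.flatMap_assoc]
  congr 1
  funext p
  rw [← iterate_flatMap]

theorem iterate_nil (k : Nat) : brutStep^[k] ([] : List (List Int)) = [] := by
  induction k with
  | zero => rfl
  | succ k ih => rw [Function.iterate_succ_apply]; simp [brutStep, ih]

theorem foldl_range_iterate (k : Nat) (L : List (List Int)) :
    (List.range k).foldl (fun lv _ => brutStep lv) L = brutStep^[k] L := by
  induction k generalizing L with
  | zero => simp
  | succ k ih =>
    rw [List.range_succ, List.foldl_append, ih, Function.iterate_succ_apply']
    simp

theorem brutforce_levels (k : Nat) (x : List Int) (hk : x.length + k = 7) :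
    brutforce x = (brutStep^[k] [x]).flatMap brutEval := by
  induction k generalizing x with
  | zero =>
    rw [brutforce_eq, if_pos (by omega)]
    simp [brutEval]
  | succ k ih =>
    rw [brutforce_eq, if_neg (by omega)]
    rw [Function.iterate_succ_apply]
    have hstep : brutStep [x] = (PySem.List.pyRange 0 9 1).flatMap
        (fun d => if d ∈ x then [] else [x ++ [d]]) := by
      simp [brutStep]
    rw [hstep, iterate_flatMap', List.flatMap_assoc]
    congr 1
    funext d
    by_cases hd : d ∈ x
    · simp [hd, iterate_nil]
    · simp only [hd, ite_false]
      rw [ih (x ++ [d]) (by simp only [List.length_append, List.length_cons, List.length_nil]; omega)]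

theorem brutforce_long (n : Nat) : ∀ (x : List Int), brutAvail x ≤ n → 7 < x.length → brutforce x = [] := by
  induction n with
  | zero =>
    intro x hm h7
    rw [brutforce_eq, if_neg (by omega)]
    apply List.flatMap_eq_nil_iff.2
    intro d hd
    have hmem := (PySem.List.mem_pyRange_one).1 hd
    by_cases hx : d ∈ x
    · simp [hx]
    · exfalso
      have hmem' : d.toNat ∈ (Finset.range 9).filter (fun e : Nat => ((e : Int) ∉ x)) := by
        simp only [Finset.mem_filter, Finset.mem_range]
        refine ⟨by omega, ?_⟩
        rw [Int.toNat_of_nonneg hmem.1]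
        exact hx
      have := Finset.card_pos.2 ⟨d.toNat, hmem'⟩
      unfold brutAvail at hm
      omega
  | succ n ih =>
    intro x hm h7
    rw [brutforce_eq, if_neg (by omega)]
    apply List.flatMap_eq_nil_iff.2
    intro d hd
    have hmem := (PySem.List.mem_pyRange_one).1 hd
    by_cases hx : d ∈ x
    · simp [hx]
    · simp only [hx, ite_false]
      have := brutAvail_append_lt x d hmem.1 hmem.2 hx
      exact ih (x ++ [d]) (by omega) (by simp only [List.length_append, List.length_cons, List.length_nil]; omega)

-- ===== VERDICT (by name: the statement is the Claim_ definition above) =====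
theorem brutforce_spec : Claim_equal_brutforce := by
  intro x _ _
  unfold Spec_brutforce brutforce_alt
  by_cases h7 : 7 < x.length
  · rw [if_pos h7, brutforce_long (brutAvail x) x le_rfl h7]
  · rw [if_neg h7, foldl_range_iterate,
        brutforce_levels (7 - x.length) x (by omega)]
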